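-- pv_equiv track=rewrite | github.com/gabriela-castro-s/Observables | calculadora_imaginarios.py | multivector
-- ===== SOURCE A (Python) =====
-- def suma (num1, num2):
--     """Funcion que suma dos numeros imaginarios, los numeros deben ser parejas ordenadas
--     (list 1D, list 1D) -> list 1D"""
--     ans1 = num1[0] + num2[0]
--     ans2 = num1[1] + num2[1]
--     return (ans1, ans2)
--
-- def mult (num1, num2):
--     """Funcion que multiplica dos numeros imaginarios, los numeros deben ser parejas ordenadas
--     (list 1D, list 1D) -> list 1D"""
--     ans1 = num1[0]*num2[0] - num1[1]*num2[1]
--     ans2 = num1[0]*num2[1] + num1[1]*num2[0]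
--     return (ans1, ans2)
--
-- def multivector(v1, v2):
--     """Funcion que multiplica dos vectores, el proposito de esta funcion es facilitar la funcion multimatriz
--     (list 1D) -> list 1D"""
--     ans = []
--     for i in range(len(v1)):
--         ans.append(mult(v1[i], v2[i]))
--     while len(ans) > 1:
--         ans[0] = suma(ans[0], ans[-1])
--         ans.pop()
--     return ans[0]
-- ===== SOURCE B (Python) =====
-- def multivector(v1, v2):
--     # One fused pass over zip(v1, v2): no intermediate product list, no pop loop.
--     pairs = zip(v1, v2)
--     x, y = next(pairs)  # empty input raises here, like A
--     acc = (x[0]*y[0] - x[1]*y[1], x[0]*y[1] + x[1]*y[0])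
--     for x, y in pairs:
--         acc = (acc[0] + x[0]*y[0] - x[1]*y[1], acc[1] + x[0]*y[1] + x[1]*y[0])
--     return acc
-- ===== Notes on version B (the rewrite author's own statement) =====
-- stated objective: simpler
-- what changed: B replaces A's two phases (build a product list by index, then a destructive while/pop summation over it) with a single fused pass over zip(v1, v2) that multiplies and accumulates in one tuple, with no helpers and no intermediate list.
import Mathlib
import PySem

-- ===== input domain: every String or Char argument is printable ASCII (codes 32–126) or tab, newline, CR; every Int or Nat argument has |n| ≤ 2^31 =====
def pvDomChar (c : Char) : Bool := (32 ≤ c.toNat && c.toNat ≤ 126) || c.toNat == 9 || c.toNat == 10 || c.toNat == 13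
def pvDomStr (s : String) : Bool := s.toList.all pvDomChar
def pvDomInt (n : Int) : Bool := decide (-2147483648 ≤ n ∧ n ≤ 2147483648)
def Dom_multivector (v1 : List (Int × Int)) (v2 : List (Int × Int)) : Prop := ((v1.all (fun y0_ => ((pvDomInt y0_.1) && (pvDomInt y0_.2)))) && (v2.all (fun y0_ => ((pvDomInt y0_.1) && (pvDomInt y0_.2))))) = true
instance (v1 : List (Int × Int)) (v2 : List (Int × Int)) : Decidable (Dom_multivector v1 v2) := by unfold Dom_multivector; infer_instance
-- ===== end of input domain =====

-- B fuses A's product-list build and while/pop summation into one pass over zip(v1, v2) (simpler; O(1) extra space).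


-- ===== PORT A =====
def pySuma (num1 num2 : Int × Int) : Int × Int := (num1.1 + num2.1, num1.2 + num2.2)

def pyMult (num1 num2 : Int × Int) : Int × Int :=
  (num1.1 * num2.1 - num1.2 * num2.2, num1.1 * num2.2 + num1.2 * num2.1)

-- the 'while len(ans) > 1: ans[0] = suma(ans[0], ans[-1]); ans.pop()' loop
def aWhile (ans : List (Int × Int)) : List (Int × Int) :=
  if ans.length > 1 then
    aWhile (pySuma (ans.headD (0, 0)) (ans.getLastD (0, 0)) :: ans.tail.dropLast)
  else ans
termination_by ans.length
decreasing_by simp; omega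

def multivector (v1 : List (Int × Int)) (v2 : List (Int × Int)) : Int × Int :=
  let ans := (PySem.List.pyRange 0 (v1.length : Int) 1).foldl
    (fun acc i => acc ++ [pyMult (PySem.List.pyGetD v1 i (0, 0)) (PySem.List.pyGetD v2 i (0, 0))]) []
  -- the final 'return ans[0]' raises IndexError on empty ans (v1 = []); excluded by Pre_
  (aWhile ans).headD (0, 0)

-- ===== PORT B =====
def multivector_alt (v1 : List (Int × Int)) (v2 : List (Int × Int)) : Int × Int :=
  match v1.zip v2 with
  | [] => (0, 0)  -- Python B: next(pairs) raises StopIteration here; excluded by Pre_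
  | (x, y) :: rest =>
    rest.foldl
      (fun acc p => (acc.1 + p.1.1 * p.2.1 - p.1.2 * p.2.2, acc.2 + p.1.1 * p.2.2 + p.1.2 * p.2.1))
      (x.1 * y.1 - x.2 * y.2, x.1 * y.2 + x.2 * y.1)

-- ===== PRECONDITION & SPEC =====
-- A indexes both vectors with range(len(v1)) and returns ans[0]: it raises IndexError
-- exactly when v1 = [] or len(v2) < len(v1); those inputs are outside Pre_.
def Pre_multivector (v1 : List (Int × Int)) (v2 : List (Int × Int)) : Prop :=
  v1 ≠ [] ∧ v1.length ≤ v2.length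
instance (v1 : List (Int × Int)) (v2 : List (Int × Int)) : Decidable (Pre_multivector v1 v2) := by
  unfold Pre_multivector; infer_instance

def pvWitness_multivector : (List (Int × Int)) × (List (Int × Int)) :=
  ([(1, 2), (3, 4)], [(5, 6), (7, 8)])

def Spec_multivector (v1 : List (Int × Int)) (v2 : List (Int × Int)) (out : Int × Int) : Prop :=
  out = multivector_alt v1 v2
instance (v1 : List (Int × Int)) (v2 : List (Int × Int)) (out : Int × Int) : Decidable (Spec_multivector v1 v2 out) := by unfold Spec_multivector; infer_instance

-- ===== CLAIM (what is proved, stated in full; the proofs are below) =====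
def Claim_equal_multivector : Prop := ∀ (v1 : List (Int × Int)) (v2 : List (Int × Int)), Dom_multivector v1 v2 → Pre_multivector v1 v2 → Spec_multivector v1 v2 (multivector v1 v2)

-- ===== LEMMAS AND PROOFS =====

-- the while/pop loop computes the componentwise sum of the product list
theorem aWhile_headD (n : Nat) (ans : List (Int × Int)) (hn : ans.length = n) (h : ans ≠ []) :
    (aWhile ans).headD (0, 0) = ((ans.map Prod.fst).sum, (ans.map Prod.snd).sum) := by
  induction n using Nat.strong_induction_on generalizing ans with
  | _ n ih =>
    rw [aWhile]
    by_cases hl : ans.length > 1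
    · simp only [hl, if_true]
      obtain ⟨a, t, rfl⟩ := List.exists_cons_of_ne_nil h
      have ht : t ≠ [] := by intro he; subst he; simp at hl
      have hgl : (a :: t).getLastD (0, 0) = t.getLast ht := by
        rw [List.getLastD_eq_getLast?, List.getLast?_eq_some_getLast (by simp),
          Option.getD_some, List.getLast_cons ht]
      have hlen : (pySuma ((a :: t).headD (0, 0)) ((a :: t).getLastD (0, 0))
          :: (a :: t).tail.dropLast).length < n := by
        subst hn; have := List.length_pos_of_ne_nil ht; simp; omega
      have hgl2 : ((a :: t).getLast?.getD ((0 : Int), (0 : Int))) = t.getLast ht := by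
        rw [List.getLast?_eq_some_getLast (by simp), Option.getD_some, List.getLast_cons ht]
      rw [ih _ hlen _ rfl (by simp)]
      conv_rhs => rw [show a :: t = a :: (t.dropLast ++ [t.getLast ht]) from by
        rw [List.dropLast_append_getLast ht]]
      simp [pySuma, hgl2]
      constructor <;> ring
    · simp only [hl, if_false]
      obtain ⟨a, t, rfl⟩ := List.exists_cons_of_ne_nil h
      have ht : t = [] := by
        cases t with
        | nil => rfl
        | cons b tb => simp at hl
      subst ht; simp

-- B's fold accumulates the componentwise sum of the products
theorem bFold (rest : List ((Int × Int) × (Int × Int))) (acc : Int × Int) :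
    rest.foldl
      (fun acc p => (acc.1 + p.1.1 * p.2.1 - p.1.2 * p.2.2, acc.2 + p.1.1 * p.2.2 + p.1.2 * p.2.1))
      acc
    = (acc.1 + ((rest.map (fun p => pyMult p.1 p.2)).map Prod.fst).sum,
       acc.2 + ((rest.map (fun p => pyMult p.1 p.2)).map Prod.snd).sum) := by
  induction rest generalizing acc with
  | nil => simp
  | cons p t ih =>
    simp only [List.foldl_cons, List.map_cons, List.sum_cons, ih, pyMult]
    refine Prod.ext ?_ ?_ <;> simp <;> ring

-- A's index-driven build produces the mapped products of the zip
theorem build_eq_zip_map (v1 v2 : List (Int × Int)) (h : v1.length ≤ v2.length) :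
    (PySem.List.pyRange 0 (v1.length : Int) 1).foldl
      (fun acc i => acc ++ [pyMult (PySem.List.pyGetD v1 i (0, 0)) (PySem.List.pyGetD v2 i (0, 0))]) []
    = (v1.zip v2).map (fun p => pyMult p.1 p.2) := by
  rw [PySem.List.foldl_append_singleton_eq_map]
  apply List.ext_getElem
  · simp [PySem.List.length_pyRange_one]; omega
  · intro k h1 h2
    have hk : k < v1.length := by
      simpa [PySem.List.length_pyRange_one] using h1
    have hk2 : k < v2.length := lt_of_lt_of_le hk h
    simp [PySem.List.getElem_pyRange_one, PySem.List.pyGetD_natCast,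
      List.getElem?_eq_getElem hk, List.getElem?_eq_getElem hk2]

-- ===== VERDICT (by name: the statement is the Claim_ definition above) =====
theorem multivector_spec : Claim_equal_multivector := by
  intro v1 v2 _ hpre
  obtain ⟨hne, hlen⟩ := hpre
  have hzip : v1.zip v2 ≠ [] := by
    cases v1 with
    | nil => exact absurd rfl hne
    | cons a t =>
      cases v2 with
      | nil => simp at hlen
      | cons b s => simp
  obtain ⟨p, rest, hp⟩ := List.exists_cons_of_ne_nil hzip
  obtain ⟨x, y⟩ := p
  have hB : multivector_alt v1 v2 = rest.foldl
      (fun acc p => (acc.1 + p.1.1 * p.2.1 - p.1.2 * p.2.2, acc.2 + p.1.1 * p.2.2 + p.1.2 * p.2.1))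
      (x.1 * y.1 - x.2 * y.2, x.1 * y.2 + x.2 * y.1) := by
    unfold multivector_alt; rw [hp]
  unfold Spec_multivector multivector
  rw [build_eq_zip_map v1 v2 hlen, hp, hB, bFold,
    aWhile_headD _ _ rfl (by simp)]
  simp [pyMult]
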